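-- pv_equiv track=rewrite | github.com/raphschlatt/ads-and | src/approaches/nand/cluster.py | _aggregate_sanitize_totals
-- ===== SOURCE A (Python) =====
-- def _aggregate_sanitize_totals(rows: list[dict[str, int]]) -> dict[str, int]:
--     out = {
--         "corrected_blocks": 0,
--         "non_finite_count": 0,
--         "negative_count": 0,
--         "above_max_count": 0,
--         "asymmetry_pairs": 0,
--         "diag_reset_count": 0,
--     }
--     for row in rows:
--         out["corrected_blocks"] += int(row.get("corrected_blocks", 0))
--         out["non_finite_count"] += int(row.get("non_finite_count", 0))
--         out["negative_count"] += int(row.get("negative_count", 0))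
--         out["above_max_count"] += int(row.get("above_max_count", 0))
--         out["asymmetry_pairs"] += int(row.get("asymmetry_pairs", 0))
--         out["diag_reset_count"] += int(row.get("diag_reset_count", 0))
--     return out
-- ===== SOURCE B (Python) =====
-- _KEYS = (
--     "corrected_blocks",
--     "non_finite_count",
--     "negative_count",
--     "above_max_count",
--     "asymmetry_pairs",
--     "diag_reset_count",
-- )
--
--
-- def _aggregate_sanitize_totals(rows: list[dict[str, int]]) -> dict[str, int]:
--     # Divide and conquer: aggregate each half of the rows recursively and
--     # merge the two partial totals key-wise.
--     if not rows:
--         return {k: 0 for k in _KEYS}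
--     if len(rows) == 1:
--         row = rows[0]
--         return {k: int(row.get(k, 0)) for k in _KEYS}
--     mid = len(rows) // 2
--     left = _aggregate_sanitize_totals(rows[:mid])
--     right = _aggregate_sanitize_totals(rows[mid:])
--     return {k: left[k] + right[k] for k in _KEYS}
-- ===== Notes on version B (the rewrite author's own statement) =====
-- stated objective: alternative
-- what changed: Replaced the single iterative loop that mutates six dict accumulators with a recursive divide-and-conquer: split rows in half, aggregate each half recursively, and merge the two partial totals key-wise.
import Mathlib
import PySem

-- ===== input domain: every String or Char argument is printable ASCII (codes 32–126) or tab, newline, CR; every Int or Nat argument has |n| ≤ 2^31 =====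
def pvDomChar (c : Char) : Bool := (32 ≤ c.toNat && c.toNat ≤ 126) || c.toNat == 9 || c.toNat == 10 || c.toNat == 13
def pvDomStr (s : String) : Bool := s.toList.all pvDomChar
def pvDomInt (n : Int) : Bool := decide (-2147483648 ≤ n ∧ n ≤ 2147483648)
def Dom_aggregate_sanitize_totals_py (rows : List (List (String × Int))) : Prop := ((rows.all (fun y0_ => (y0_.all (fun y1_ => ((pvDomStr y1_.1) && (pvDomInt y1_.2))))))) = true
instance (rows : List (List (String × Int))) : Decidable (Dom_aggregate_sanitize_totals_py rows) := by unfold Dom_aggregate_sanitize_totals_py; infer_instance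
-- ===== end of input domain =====

-- B replaces A's single loop updating six dict accumulators by a recursive
-- divide-and-conquer (aggregate each half, merge key-wise); objective: alternative.

-- ===== PORT A =====
-- one loop iteration of A: six in-place `out[k] += int(row.get(k, 0))` updates
-- (values are already Int, so int() is the identity here)
def aggStepA (out : PySem.Dict String Int) (row : List (String × Int)) : PySem.Dict String Int :=
  let r := PySem.Dict.mk row
  ((((((out.modify "corrected_blocks" 0 (· + r.getD "corrected_blocks" 0)).modify
        "non_finite_count" 0 (· + r.getD "non_finite_count" 0)).modify
        "negative_count" 0 (· + r.getD "negative_count" 0)).modify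
        "above_max_count" 0 (· + r.getD "above_max_count" 0)).modify
        "asymmetry_pairs" 0 (· + r.getD "asymmetry_pairs" 0)).modify
        "diag_reset_count" 0 (· + r.getD "diag_reset_count" 0))

def aggregate_sanitize_totals_py (rows : List (List (String × Int))) : List (String × Int) :=
  (rows.foldl aggStepA
    (PySem.Dict.mk [("corrected_blocks", 0), ("non_finite_count", 0), ("negative_count", 0),
                    ("above_max_count", 0), ("asymmetry_pairs", 0), ("diag_reset_count", 0)])).items

-- ===== PORT B =====
def aggKeys : List String :=
  ["corrected_blocks", "non_finite_count", "negative_count",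
   "above_max_count", "asymmetry_pairs", "diag_reset_count"]

-- left[k] / right[k]: the key is always present in the recursive result, so
-- the lookup never raises; ported as getD 0 (exact here for that reason).
-- fuel = rows.length bounds the recursion depth (each call strictly shrinks
-- the list), making the same computation structurally total; the fuel-0 arm
-- is unreachable.
def aggAltGo (fuel : Nat) (rows : List (List (String × Int))) : List (String × Int) :=
  if rows = [] then
    aggKeys.map (fun k => (k, (0 : Int)))
  else if rows.length = 1 then
    let row := PySem.List.pyGetD rows 0 []
    aggKeys.map (fun k => (k, (PySem.Dict.mk row).getD k 0))
  else
    match fuel with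
    | 0 => []
    | f + 1 =>
      let mid := PySem.Int.floordiv (rows.length : Int) 2
      let left := aggAltGo f (PySem.List.slice rows none (some mid))
      let right := aggAltGo f (PySem.List.slice rows (some mid) none)
      aggKeys.map (fun k => (k, (PySem.Dict.mk left).getD k 0 + (PySem.Dict.mk right).getD k 0))

def aggregate_sanitize_totals_py_alt (rows : List (List (String × Int))) : List (String × Int) :=
  aggAltGo rows.length rows

-- ===== PRECONDITION & SPEC =====
def Spec_aggregate_sanitize_totals_py (rows : List (List (String × Int))) (out : List (String × Int)) : Prop := out = aggregate_sanitize_totals_py_alt rows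
instance (rows : List (List (String × Int))) (out : List (String × Int)) : Decidable (Spec_aggregate_sanitize_totals_py rows out) := by unfold Spec_aggregate_sanitize_totals_py; infer_instance

-- ===== CLAIM (what is proved, stated in full; the proofs are below) =====
def Claim_equal_aggregate_sanitize_totals_py : Prop := ∀ (rows : List (List (String × Int))), Dom_aggregate_sanitize_totals_py rows → Spec_aggregate_sanitize_totals_py rows (aggregate_sanitize_totals_py rows)

-- ===== LEMMAS AND PROOFS =====
def aggGet (k : String) (row : List (String × Int)) : Int := (PySem.Dict.mk row).getD k 0

def aggSum (k : String) (rows : List (List (String × Int))) : Int := (rows.map (aggGet k)).sum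

-- the common normal form both ports are reduced to
def aggTable (rows : List (List (String × Int))) : List (String × Int) :=
  [("corrected_blocks", aggSum "corrected_blocks" rows),
   ("non_finite_count", aggSum "non_finite_count" rows),
   ("negative_count", aggSum "negative_count" rows),
   ("above_max_count", aggSum "above_max_count" rows),
   ("asymmetry_pairs", aggSum "asymmetry_pairs" rows),
   ("diag_reset_count", aggSum "diag_reset_count" rows)]

lemma aggStepA_mk (v1 v2 v3 v4 v5 v6 : Int) (row : List (String × Int)) :
    aggStepA (PySem.Dict.mk [("corrected_blocks", v1), ("non_finite_count", v2),
      ("negative_count", v3), ("above_max_count", v4), ("asymmetry_pairs", v5),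
      ("diag_reset_count", v6)]) row
    = PySem.Dict.mk [("corrected_blocks", v1 + aggGet "corrected_blocks" row),
        ("non_finite_count", v2 + aggGet "non_finite_count" row),
        ("negative_count", v3 + aggGet "negative_count" row),
        ("above_max_count", v4 + aggGet "above_max_count" row),
        ("asymmetry_pairs", v5 + aggGet "asymmetry_pairs" row),
        ("diag_reset_count", v6 + aggGet "diag_reset_count" row)] := rfl

lemma aggLoopA (rows : List (List (String × Int))) (v1 v2 v3 v4 v5 v6 : Int) :
    rows.foldl aggStepA (PySem.Dict.mk [("corrected_blocks", v1), ("non_finite_count", v2),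
      ("negative_count", v3), ("above_max_count", v4), ("asymmetry_pairs", v5),
      ("diag_reset_count", v6)])
    = PySem.Dict.mk [("corrected_blocks", v1 + aggSum "corrected_blocks" rows),
        ("non_finite_count", v2 + aggSum "non_finite_count" rows),
        ("negative_count", v3 + aggSum "negative_count" rows),
        ("above_max_count", v4 + aggSum "above_max_count" rows),
        ("asymmetry_pairs", v5 + aggSum "asymmetry_pairs" rows),
        ("diag_reset_count", v6 + aggSum "diag_reset_count" rows)] := by
  induction rows generalizing v1 v2 v3 v4 v5 v6 with
  | nil => simp [aggSum]
  | cons r rs ih =>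
      rw [List.foldl_cons, aggStepA_mk, ih]
      simp [aggSum, add_assoc]

lemma aggA_eq_table (rows : List (List (String × Int))) :
    aggregate_sanitize_totals_py rows = aggTable rows := by
  unfold aggregate_sanitize_totals_py
  rw [aggLoopA]
  simp only [zero_add]
  rfl

lemma aggSum_append (k : String) (l r : List (List (String × Int))) :
    aggSum k (l ++ r) = aggSum k l + aggSum k r := by
  simp [aggSum]

lemma aggAltGo_eq_table (fuel : Nat) (rows : List (List (String × Int)))
    (hle : rows.length ≤ fuel) : aggAltGo fuel rows = aggTable rows := by
  induction fuel generalizing rows with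
  | zero =>
    have h0 : rows = [] := by
      cases rows with
      | nil => rfl
      | cons a t => simp at hle
    subst h0
    simp [aggAltGo, aggTable, aggSum, aggKeys]
  | succ f ih =>
    rw [aggAltGo]
    by_cases h0 : rows = []
    · subst h0; simp [aggTable, aggSum, aggKeys]
    · by_cases h1 : rows.length = 1
      · rcases rows with _ | ⟨row, t⟩
        · simp at h0
        · have ht : t = [] := by simpa using h1
          subst ht
          simp only [h0, h1, if_false, if_true]
          simp [aggKeys, aggTable, aggSum, aggGet, PySem.List.pyGetD_zero_cons]
      · simp only [h0, h1, if_false]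
        have h2 : 2 ≤ rows.length := by
          cases rows with
          | nil => exact absurd rfl h0
          | cons a t =>
            cases t with
            | nil => simp at h1
            | cons b u => simp
        have hmid : PySem.Int.floordiv (rows.length : Int) 2 = ((rows.length / 2 : Nat) : Int) := by
          rw [PySem.Int.floordiv_eq_ediv_of_pos (by norm_num)]
          exact_mod_cast (Int.natCast_div rows.length 2).symm
        rw [hmid, PySem.List.slice_to rows (by positivity), PySem.List.slice_from rows (by positivity)]
        simp only [Int.toNat_natCast]
        have hl : (rows.take (rows.length / 2)).length ≤ f := by simp; omega
        have hr : (rows.drop (rows.length / 2)).length ≤ f := by simp; omega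
        rw [ih _ hl, ih _ hr]
        have hsplit : ∀ k : String, aggSum k rows
            = aggSum k (rows.take (rows.length / 2)) + aggSum k (rows.drop (rows.length / 2)) := by
          intro k
          conv_lhs => rw [← List.take_append_drop (rows.length / 2) rows]
          exact aggSum_append k _ _
        simp only [aggTable, aggKeys, List.map]
        rw [hsplit "corrected_blocks", hsplit "non_finite_count", hsplit "negative_count",
            hsplit "above_max_count", hsplit "asymmetry_pairs", hsplit "diag_reset_count"]
        rfl

lemma aggAlt_eq_table (rows : List (List (String × Int))) :
    aggregate_sanitize_totals_py_alt rows = aggTable rows :=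
  aggAltGo_eq_table rows.length rows le_rfl

-- ===== VERDICT (by name: the statement is the Claim_ definition above) =====
theorem aggregate_sanitize_totals_py_spec : Claim_equal_aggregate_sanitize_totals_py := by
  intro rows _
  unfold Spec_aggregate_sanitize_totals_py
  rw [aggA_eq_table, aggAlt_eq_table]
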